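-- pv_equiv track=rewrite | github.com/blueberrycongee/termcanvas | eval/scripts/download-dataset.py | count_files_in_patch
-- ===== SOURCE A (Python) =====
-- def count_files_in_patch(patch: str) -> list[str]:
--     """Extract file paths from a unified diff patch."""
--     files = []
--     for line in patch.split("\n"):
--         if line.startswith("diff --git"):
--             parts = line.split(" b/", 1)
--             if len(parts) == 2:
--                 files.append(parts[1])
--     return files
-- ===== SOURCE B (Python) =====
-- def count_files_in_patch(patch: str) -> list[str]:
--     """Extract file paths from a unified diff patch."""
--     files = []
--     # One C-level split on the header marker instead of a Python-level loop over every line.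
--     for chunk in ("\n" + patch).split("\ndiff --git")[1:]:
--         line = chunk.split("\n", 1)[0]
--         i = line.find(" b/")
--         if i != -1:
--             files.append(line[i + 3:])
--     return files
-- ===== Notes on version B (the rewrite author's own statement) =====
-- stated objective: alternative
-- what changed: Instead of looping over every line and testing startswith, B splits the whole patch once on the header marker (newline followed by 'diff --git', after prepending a newline) and extracts the path from the first line of each chunk after a marker.
import Mathlib
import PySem

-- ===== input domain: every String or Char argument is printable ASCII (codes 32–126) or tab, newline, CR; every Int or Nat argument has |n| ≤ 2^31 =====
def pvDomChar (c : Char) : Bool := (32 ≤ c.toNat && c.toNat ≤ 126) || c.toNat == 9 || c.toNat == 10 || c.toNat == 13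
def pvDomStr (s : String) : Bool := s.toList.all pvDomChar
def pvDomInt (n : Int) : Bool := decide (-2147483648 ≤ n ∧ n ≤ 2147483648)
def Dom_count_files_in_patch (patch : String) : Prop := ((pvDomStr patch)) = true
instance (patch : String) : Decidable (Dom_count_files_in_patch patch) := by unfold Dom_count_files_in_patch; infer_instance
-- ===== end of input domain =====

-- B replaces A's per-line loop by one split of the whole patch on the header marker "\ndiff --git"
-- (per-header work instead of per-line work; same return value).

-- ===== PORT A =====
-- literal transliteration of A: loop over patch.split("\n"); on lines starting with "diff --git",
-- parts = line.split(" b/", 1); if len(parts) == 2: append parts[1].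
-- (splitOn is exact for s.split(sep) with nonempty sep; parts[1] is guarded by the length test,
-- so getD 1 [] is exact.)
def count_files_in_patch (patch : String) : List String :=
  (PySem.Chars.splitOn patch.toList "\n".toList).foldl
    (fun files line =>
      if PySem.Chars.startswith line "diff --git".toList then
        let parts := PySem.Chars.splitOnMax line " b/".toList 1
        if parts.length = 2 then files ++ [String.ofList (parts.getD 1 [])] else files
      else files) []

-- ===== PORT B =====
-- literal transliteration of B: for chunk in ("\n"+patch).split("\ndiff --git")[1:]:
--   line = chunk.split("\n", 1)[0]; i = line.find(" b/"); if i != -1: append line[i+3:]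
-- (chunk.split("\n",1)[0] always exists, so headD [] is exact.)
def count_files_in_patch_alt (patch : String) : List String :=
  ((PySem.Chars.splitOn ('\n' :: patch.toList) "\ndiff --git".toList).drop 1).foldl
    (fun files chunk =>
      let line := (PySem.Chars.splitOnMax chunk "\n".toList 1).headD []
      let i := PySem.Chars.find line " b/".toList
      if i = -1 then files
      else files ++ [String.ofList (PySem.Chars.slice line (some (i + 3)) none)]) []

-- ===== PRECONDITION & SPEC =====
def Spec_count_files_in_patch (patch : String) (out : List String) : Prop := out = count_files_in_patch_alt patch
instance (patch : String) (out : List String) : Decidable (Spec_count_files_in_patch patch out) := by unfold Spec_count_files_in_patch; infer_instance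

-- ===== CLAIM (what is proved, stated in full; the proofs are below) =====
def Claim_equal_count_files_in_patch : Prop := ∀ (patch : String), Dom_count_files_in_patch patch → Spec_count_files_in_patch patch (count_files_in_patch patch)

-- ===== LEMMAS AND PROOFS =====

-- concrete character lists
def Gc : List Char := ['d','i','f','f',' ','-','-','g','i','t']
def SBc : List Char := [' ','b','/']
def NLs : List Char := ['\n']
def SEPc : List Char := '\n' :: Gc

theorem Gc_eq : "diff --git".toList = Gc := by decide
theorem SBc_eq : " b/".toList = SBc := by decide
theorem NLs_eq : "\n".toList = NLs := by decide
theorem SEPc_eq : "\ndiff --git".toList = SEPc := by decide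

-- prepend a list onto the first piece
def chHead (pre : List Char) : List (List Char) → List (List Char)
  | [] => [pre]
  | p :: ps => (pre ++ p) :: ps

theorem chHead_ne_nil (pre : List Char) (X : List (List Char)) : chHead pre X ≠ [] := by
  cases X <;> simp [chHead]

theorem chHead_chHead (a b : List Char) (X : List (List Char)) :
    chHead a (chHead b X) = chHead (a ++ b) X := by
  cases X <;> simp [chHead]

-- fuel-free model of str.split(sep) (sep nonempty)
def sp (sep : List Char) : List Char → List (List Char)
  | [] => [[]]
  | c :: rest =>
    if sep.isPrefixOf (c :: rest) then [] :: sp sep (rest.drop (sep.length - 1))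
    else chHead [c] (sp sep rest)
termination_by l => l.length
decreasing_by
  · simp only [List.length_cons, List.length_drop]; omega
  · simp only [List.length_cons]; omega

-- fuel-free model of str.split(sep, 1) (sep nonempty)
def sp1 (sep : List Char) : List Char → List (List Char)
  | [] => [[]]
  | c :: rest =>
    if sep.isPrefixOf (c :: rest) then [[], rest.drop (sep.length - 1)]
    else chHead [c] (sp1 sep rest)

theorem sp1_ne_nil (sep l) : sp1 sep l ≠ [] := by
  cases l with
  | nil => simp [sp1]
  | cons c rest => rw [sp1]; split <;> simp [chHead_ne_nil]

theorem sp_ne_nil (sep l) : sp sep l ≠ [] := by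
  cases l with
  | nil => simp [sp]
  | cons c rest => rw [sp]; split <;> simp [chHead_ne_nil]

theorem go_eq (sep : List Char) (hsep : sep ≠ []) :
    ∀ fuel l cur acc, l.length < fuel →
      PySem.Chars.splitOn.go sep fuel l cur acc = acc.reverse ++ chHead cur.reverse (sp sep l) := by
  intro fuel
  induction fuel with
  | zero => intro l cur acc h; omega
  | succ n ih =>
    intro l cur acc h
    cases l with
    | nil =>
      rw [PySem.Chars.splitOn.go.eq_def]
      simp [sp, chHead]
    | cons c rest =>
      rw [PySem.Chars.splitOn.go.eq_def]
      simp only []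
      rw [sp]
      obtain ⟨m, hm⟩ : ∃ m, sep.length = m + 1 := by
        cases sep with
        | nil => exact absurd rfl hsep
        | cons a as => exact ⟨as.length, rfl⟩
      split
      · have hdrop : (c :: rest).drop sep.length = rest.drop (sep.length - 1) := by
          rw [hm]; simp [List.drop_succ_cons]
        rw [hdrop, ih _ [] (cur.reverse :: acc) (by simp at h ⊢; have := List.length_drop (l := rest) (i := sep.length - 1); omega)]
        obtain ⟨p, ps, hps⟩ : ∃ p ps, sp sep (rest.drop (sep.length - 1)) = p :: ps := by
          cases hX : sp sep (rest.drop (sep.length - 1)) with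
          | nil => exact absurd hX (sp_ne_nil _ _)
          | cons p ps => exact ⟨p, ps, rfl⟩
        rw [hps]; simp [chHead]
      · rw [ih rest (c :: cur) acc (by simp at h ⊢; omega)]
        rw [show (c :: cur).reverse = cur.reverse ++ [c] by simp, ← chHead_chHead]

theorem splitOn_eq_sp (sep : List Char) (hsep : sep ≠ []) (l : List Char) :
    PySem.Chars.splitOn l sep = sp sep l := by
  unfold PySem.Chars.splitOn
  rw [go_eq sep hsep _ l [] [] (by omega)]
  obtain ⟨p, ps, hps⟩ : ∃ p ps, sp sep l = p :: ps := by
    cases hX : sp sep l with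
    | nil => exact absurd hX (sp_ne_nil _ _)
    | cons p ps => exact ⟨p, ps, rfl⟩
  rw [hps]; simp [chHead]

theorem go1_zero (sep : List Char) :
    ∀ fuel l cur acc, PySem.Chars.splitOnMax.go sep fuel 0 l cur acc = ((cur.reverse ++ l) :: acc).reverse := by
  intro fuel l cur acc
  cases fuel <;> cases l <;> rw [PySem.Chars.splitOnMax.go.eq_def] <;> simp

theorem go1_eq (sep : List Char) (hsep : sep ≠ []) :
    ∀ fuel l cur acc, l.length < fuel →
      PySem.Chars.splitOnMax.go sep fuel 1 l cur acc = acc.reverse ++ chHead cur.reverse (sp1 sep l) := by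
  intro fuel
  induction fuel with
  | zero => intro l cur acc h; omega
  | succ n ih =>
    intro l cur acc h
    cases l with
    | nil =>
      rw [PySem.Chars.splitOnMax.go.eq_def]
      simp [sp1, chHead]
    | cons c rest =>
      rw [PySem.Chars.splitOnMax.go.eq_def]
      simp only [Nat.one_ne_zero, if_false]
      rw [sp1]
      obtain ⟨m, hm⟩ : ∃ m, sep.length = m + 1 := by
        cases sep with
        | nil => exact absurd rfl hsep
        | cons a as => exact ⟨as.length, rfl⟩
      split
      · have hdrop : (c :: rest).drop sep.length = rest.drop (sep.length - 1) := by
          rw [hm]; simp [List.drop_succ_cons]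
        rw [hdrop]
        rw [show (1 : Nat) - 1 = 0 from rfl, go1_zero]
        simp [chHead]
      · rw [ih rest (c :: cur) acc (by simp at h ⊢; omega)]
        rw [show (c :: cur).reverse = cur.reverse ++ [c] by simp, ← chHead_chHead]

theorem splitOnMax_one (sep : List Char) (hsep : sep ≠ []) (l : List Char) :
    PySem.Chars.splitOnMax l sep 1 = sp1 sep l := by
  unfold PySem.Chars.splitOnMax
  rw [if_neg (by norm_num), show (1 : Int).toNat = 1 from rfl]
  rw [go1_eq sep hsep _ l [] [] (by omega)]
  cases hX : sp1 sep l with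
  | nil => exact absurd hX (sp1_ne_nil _ _)
  | cons p ps => simp [chHead]

-- find lemmas
theorem find_go_shift (sub : List Char) (hsub : sub ≠ []) :
    ∀ l k, PySem.Chars.find.go sub l k =
      if PySem.Chars.find.go sub l 0 = -1 then -1 else PySem.Chars.find.go sub l 0 + k := by
  intro l
  induction l with
  | nil =>
    intro k
    rw [PySem.Chars.find.go.eq_1, PySem.Chars.find.go.eq_1]
    simp [List.isEmpty_iff, hsub]
  | cons c t ih =>
    intro k
    rw [PySem.Chars.find.go.eq_2, PySem.Chars.find.go.eq_2 sub 0]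
    split
    · simp
    · rw [ih (k + 1), ih 1]
      have hge : -1 ≤ PySem.Chars.find.go sub t 0 := PySem.Chars.neg_one_le_find t sub
      split
      · simp
      · rename_i hne
        rw [if_neg (by omega)]
        push_cast
        omega

theorem find_cons (sub : List Char) (hsub : sub ≠ []) (c : Char) (t : List Char) :
    PySem.Chars.find (c :: t) sub =
      if sub.isPrefixOf (c :: t) then 0
      else (if PySem.Chars.find t sub = -1 then -1 else PySem.Chars.find t sub + 1) := by
  show PySem.Chars.find.go sub (c :: t) 0 = _
  rw [PySem.Chars.find.go.eq_2]
  split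
  · simp
  · exact find_go_shift sub hsub t 1

theorem find_nil (sub : List Char) (hsub : sub ≠ []) : PySem.Chars.find [] sub = -1 := by
  show PySem.Chars.find.go sub [] 0 = -1
  rw [PySem.Chars.find.go.eq_1]
  simp [List.isEmpty_iff, hsub]

theorem find_nonneg_of_ne (s sub : List Char) (h : PySem.Chars.find s sub ≠ -1) :
    0 ≤ PySem.Chars.find s sub := by
  have := PySem.Chars.neg_one_le_find s sub
  omega

-- sp1 characterisation
theorem sp1_of_not_in (sub : List Char) (hsub : sub ≠ []) :
    ∀ l, PySem.Chars.find l sub = -1 → sp1 sub l = [l] := by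
  intro l
  induction l with
  | nil => intro _; rfl
  | cons c t ih =>
    intro h
    rw [find_cons sub hsub] at h
    rw [sp1]
    split
    · rename_i hp; rw [if_pos hp] at h; omega
    · rename_i hp
      rw [if_neg hp] at h
      have ht : PySem.Chars.find t sub = -1 := by
        by_contra hne
        rw [if_neg hne] at h
        have := find_nonneg_of_ne t sub hne
        omega
      rw [ih ht]; rfl

theorem sp1_of_in (sub : List Char) (hsub : sub ≠ []) :
    ∀ l, PySem.Chars.find l sub ≠ -1 →
      sp1 sub l = [l.take (PySem.Chars.find l sub).toNat,
                   l.drop ((PySem.Chars.find l sub).toNat + sub.length)] := by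
  intro l
  induction l with
  | nil => intro h; exact absurd (find_nil sub hsub) h
  | cons c t ih =>
    intro h
    obtain ⟨m, hm⟩ : ∃ m, sub.length = m + 1 := by
      cases sub with
      | nil => exact absurd rfl hsub
      | cons a as => exact ⟨as.length, rfl⟩
    rw [sp1]
    split
    · rename_i hp
      rw [find_cons sub hsub, if_pos hp]
      simp [hm, List.drop_succ_cons]
    · rename_i hp
      rw [find_cons sub hsub, if_neg hp] at h ⊢
      have ht : PySem.Chars.find t sub ≠ -1 := by
        by_contra he; rw [if_pos he] at h; exact h rfl
      rw [if_neg ht] at h ⊢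
      have htn : 0 ≤ PySem.Chars.find t sub := find_nonneg_of_ne t sub ht
      rw [ih ht]
      have h1 : (PySem.Chars.find t sub + 1).toNat = (PySem.Chars.find t sub).toNat + 1 := by omega
      rw [h1]
      have e2 : (c :: t).drop ((PySem.Chars.find t sub).toNat + 1 + sub.length)
          = t.drop ((PySem.Chars.find t sub).toNat + sub.length) := by
        rw [show (PySem.Chars.find t sub).toNat + 1 + sub.length
              = ((PySem.Chars.find t sub).toNat + sub.length) + 1 by omega, List.drop_succ_cons]
      rw [e2, List.take_succ_cons]
      rfl

-- per-line / per-chunk extraction specs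
def extractLine (l : List Char) : Option (List Char) :=
  if Gc.isPrefixOf l ∧ PySem.Chars.find l SBc ≠ -1 then
    some (l.drop ((PySem.Chars.find l SBc).toNat + 3))
  else none

def extractLine2 (l : List Char) : Option (List Char) :=
  if Gc.isPrefixOf l then
    (if PySem.Chars.find (l.drop 10) SBc = -1 then none
     else some ((l.drop 10).drop ((PySem.Chars.find (l.drop 10) SBc).toNat + 3)))
  else none

def extractChunk (chunk : List Char) : Option (List Char) :=
  if PySem.Chars.find ((sp1 NLs chunk).headD []) SBc = -1 then none
  else some (((sp1 NLs chunk).headD []).drop ((PySem.Chars.find ((sp1 NLs chunk).headD []) SBc).toNat + 3))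

-- A's fold equals filterMap extractLine
theorem foldA (lines : List (List Char)) : ∀ acc : List String,
    lines.foldl
      (fun files line =>
        if PySem.Chars.startswith line Gc then
          let parts := PySem.Chars.splitOnMax line SBc 1
          if parts.length = 2 then files ++ [String.ofList (parts.getD 1 [])] else files
        else files) acc
    = acc ++ (lines.filterMap extractLine).map String.ofList := by
  induction lines with
  | nil => intro acc; simp
  | cons l rest ih =>
    intro acc
    rw [List.foldl_cons, List.filterMap_cons]
    by_cases hp : Gc.isPrefixOf l
    · have hsw : PySem.Chars.startswith l Gc = true := by
        simp [PySem.Chars.startswith, hp]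
      rw [if_pos hsw]
      simp only []
      rw [splitOnMax_one SBc (by simp [SBc]) l]
      by_cases hf : PySem.Chars.find l SBc = -1
      · rw [sp1_of_not_in SBc (by simp [SBc]) l hf]
        rw [if_neg (by simp)]
        rw [ih, extractLine, if_neg (by simp [hf])]
      · rw [sp1_of_in SBc (by simp [SBc]) l hf]
        rw [if_pos (by simp)]
        rw [ih, extractLine, if_pos ⟨hp, hf⟩]
        simp [SBc]
    · have hsw : PySem.Chars.startswith l Gc = false := by
        simp [PySem.Chars.startswith, hp]
      rw [hsw]
      simp only [Bool.false_eq_true, if_false]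
      rw [ih, extractLine, if_neg (by simp [hp])]

-- B's fold equals filterMap extractChunk
theorem foldB (chunks : List (List Char)) : ∀ acc : List String,
    chunks.foldl
      (fun files chunk =>
        let line := (PySem.Chars.splitOnMax chunk NLs 1).headD []
        let i := PySem.Chars.find line SBc
        if i = -1 then files
        else files ++ [String.ofList (PySem.Chars.slice line (some (i + 3)) none)]) acc
    = acc ++ (chunks.filterMap extractChunk).map String.ofList := by
  induction chunks with
  | nil => intro acc; simp
  | cons ch rest ih =>
    intro acc
    rw [List.foldl_cons, List.filterMap_cons]
    simp only []
    rw [splitOnMax_one NLs (by simp [NLs]) ch]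
    by_cases hf : PySem.Chars.find ((sp1 NLs ch).headD []) SBc = -1
    · rw [if_pos hf, ih]
      simp only [extractChunk]
      rw [if_pos hf]
    · rw [if_neg hf, ih]
      have h0 : 0 ≤ PySem.Chars.find ((sp1 NLs ch).headD []) SBc :=
        find_nonneg_of_ne _ _ hf
      have hsl : PySem.Chars.slice ((sp1 NLs ch).headD []) (some (PySem.Chars.find ((sp1 NLs ch).headD []) SBc + 3)) none
          = ((sp1 NLs ch).headD []).drop ((PySem.Chars.find ((sp1 NLs ch).headD []) SBc).toNat + 3) := by
        rw [PySem.Chars.slice_eq_listSlice, PySem.List.slice_from _ (by omega)]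
        congr 1
        omega
      rw [hsl]
      simp only [extractChunk]
      rw [if_neg hf, List.map_cons]
      simp

-- lines of a string: structure of sp ['\n']
theorem sp_nl_cons (c : Char) (cs : List Char) :
    sp NLs (c :: cs) = if c = '\n' then [] :: sp NLs cs else chHead [c] (sp NLs cs) := by
  rw [sp]
  by_cases h : c = '\n'
  · rw [if_pos h, if_pos (by simp [NLs, h])]
    simp [NLs]
  · rw [if_neg h, if_neg (by simp [NLs]; exact fun he => absurd he.symm h)]

def flatL (LS : List (List Char)) : List Char := LS.flatMap (fun l => '\n' :: l)

theorem flatL_cons (l : List Char) (rest : List (List Char)) :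
    flatL (l :: rest) = '\n' :: (l ++ flatL rest) := by simp [flatL]

theorem lines_clean_flat (cs : List Char) :
    (∀ l ∈ sp NLs cs, '\n' ∉ l) ∧ flatL (sp NLs cs) = '\n' :: cs := by
  induction cs with
  | nil => exact ⟨by simp [sp], by simp [sp, flatL]⟩
  | cons c cs ih =>
    obtain ⟨p, ps, hps⟩ : ∃ p ps, sp NLs cs = p :: ps := by
      cases hX : sp NLs cs with
      | nil => exact absurd hX (sp_ne_nil _ _)
      | cons p ps => exact ⟨p, ps, rfl⟩
    rw [sp_nl_cons]
    by_cases h : c = '\n'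
    · subst h
      rw [if_pos rfl]
      refine ⟨?_, ?_⟩
      · simp only [List.mem_cons]
        rintro l (rfl | hl)
        · simp
        · exact ih.1 l hl
      · rw [flatL_cons, ih.2]
        simp
    · rw [if_neg h, hps]
      have ihc := ih
      rw [hps] at ihc
      have h2 : p ++ flatL ps = cs := by
        have := ihc.2
        rw [flatL_cons] at this
        simpa using this
      refine ⟨?_, ?_⟩
      · simp only [chHead, List.mem_cons]
        rintro l (rfl | hl)
        · intro hm
          rcases List.mem_append.mp hm with hm1 | hm1
          · simp at hm1; exact h hm1.symm
          · exact ihc.1 p (by simp) hm1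
        · exact ihc.1 l (List.mem_cons_of_mem _ hl)
      · simp only [chHead, flatL_cons]
        simp [h2]

-- chunk structure
def Cfun : List (List Char) → List (List Char)
  | [] => [[]]
  | l :: rest =>
    if Gc.isPrefixOf l then [] :: chHead (l.drop 10) (Cfun rest)
    else chHead ('\n' :: l) (Cfun rest)

theorem Cfun_shape (LS : List (List Char)) :
    ∃ h t, Cfun LS = h :: t ∧ (h = [] ∨ ∃ u, h = '\n' :: u) := by
  cases LS with
  | nil => exact ⟨[], [], rfl, Or.inl rfl⟩
  | cons l rest =>
    rw [Cfun]
    by_cases hp : Gc.isPrefixOf l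
    · rw [if_pos hp]; exact ⟨[], _, rfl, Or.inl rfl⟩
    · rw [if_neg hp]
      cases hX : Cfun rest with
      | nil => exact ⟨'\n' :: l, [], by simp [chHead], Or.inr ⟨l, rfl⟩⟩
      | cons p ps => exact ⟨'\n' :: (l ++ p), ps, by simp [chHead], Or.inr ⟨l ++ p, rfl⟩⟩

theorem flat_shape (LS : List (List Char)) : flatL LS = [] ∨ ∃ u, flatL LS = '\n' :: u := by
  cases LS with
  | nil => exact Or.inl rfl
  | cons l rest => exact Or.inr ⟨l ++ flatL rest, flatL_cons l rest⟩

-- Gc is a prefix of l ++ t iff of l, for newline-free l and t empty or newline-headed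
theorem G_prefix_append (l : List Char) (hl : '\n' ∉ l) (t : List Char)
    (ht : t = [] ∨ ∃ u, t = '\n' :: u) :
    Gc.isPrefixOf (l ++ t) = Gc.isPrefixOf l := by
  by_cases hpl : Gc <+: l
  · rw [List.isPrefixOf_iff_prefix.mpr (hpl.trans (List.prefix_append l t)),
        List.isPrefixOf_iff_prefix.mpr hpl]
  · have hnot : ¬ Gc <+: (l ++ t) := by
      intro hp
      by_cases hlen : Gc.length ≤ l.length
      · apply hpl
        rw [List.prefix_iff_eq_take] at hp
        rw [List.take_append_of_le_length hlen] at hp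
        exact List.prefix_iff_eq_take.mpr hp
      · have hlen' : l.length < Gc.length := by omega
        rcases ht with h0 | ⟨u, hu⟩
        · subst h0; simp at hp; exact hpl hp
        · subst hu
          have hidx : l.length < Gc.length := hlen'
          have h1 := hp.getElem (i := l.length) hidx
          have hgr : (l ++ '\n' :: u)[l.length]'(by simp) = '\n' := by
            rw [List.getElem_append_right (by omega)]
            simp
          have h3 : Gc[l.length] = '\n' := h1.trans hgr
          have hmem : '\n' ∈ Gc := h3 ▸ List.getElem_mem hidx
          simp [Gc] at hmem
    have e1 : Gc.isPrefixOf (l ++ t) = false :=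
      Bool.eq_false_iff.mpr (fun h => hnot (List.isPrefixOf_iff_prefix.mp h))
    have e2 : Gc.isPrefixOf l = false :=
      Bool.eq_false_iff.mpr (fun h => hpl (List.isPrefixOf_iff_prefix.mp h))
    rw [e1, e2]

theorem sp_clean_append (t : List Char) :
    ∀ m, '\n' ∉ m → sp SEPc (m ++ t) = chHead m (sp SEPc t) := by
  intro m
  induction m with
  | nil =>
    intro _
    cases hX : sp SEPc t with
    | nil => exact absurd hX (sp_ne_nil _ _)
    | cons p ps => rw [List.nil_append, hX]; simp [chHead]
  | cons c m' ih =>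
    intro hm
    have hc : c ≠ '\n' := fun h => hm (by simp [h])
    rw [List.cons_append, sp]
    rw [if_neg (by simp [SEPc]; exact fun he => absurd he.symm hc)]
    rw [ih (fun h => hm (by simp [h]))]
    rw [chHead_chHead]
    rfl

theorem spf (LS : List (List Char)) (hclean : ∀ l ∈ LS, '\n' ∉ l) :
    sp SEPc (flatL LS) = Cfun LS := by
  induction LS with
  | nil => simp [flatL, sp, Cfun]
  | cons l rest ih =>
    have hl : '\n' ∉ l := hclean l (by simp)
    have hrest : ∀ l' ∈ rest, '\n' ∉ l' := fun l' h => hclean l' (by simp [h])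
    rw [flatL_cons, Cfun, sp]
    have hcond : SEPc.isPrefixOf ('\n' :: (l ++ flatL rest)) = Gc.isPrefixOf l := by
      have : SEPc.isPrefixOf ('\n' :: (l ++ flatL rest)) = Gc.isPrefixOf (l ++ flatL rest) := by
        simp [SEPc]
      rw [this, G_prefix_append l hl _ (flat_shape rest)]
    by_cases hp : Gc.isPrefixOf l
    · rw [if_pos (by rw [hcond]; exact hp), if_pos hp]
      have hlen : 10 ≤ l.length := by
        have := (List.isPrefixOf_iff_prefix.mp hp).length_le
        simpa [Gc] using this
      have hdrop : (l ++ flatL rest).drop (SEPc.length - 1) = l.drop 10 ++ flatL rest := by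
        have : SEPc.length - 1 = 10 := by simp [SEPc, Gc]
        rw [this, List.drop_append, show (10 : Nat) - l.length = 0 by omega]
        simp
      rw [hdrop]
      rw [sp_clean_append _ _ (fun h => hl (List.mem_of_mem_drop h))]
      rw [ih hrest]
    · rw [if_neg (by rw [hcond]; exact hp), if_neg hp]
      rw [sp_clean_append _ _ hl, ih hrest, chHead_chHead]
      rfl

-- first line of a chunk
theorem sp1_nl_clean (r : List Char) (hr : '\n' ∉ r) : sp1 NLs r = [r] := by
  apply sp1_of_not_in NLs (by simp [NLs])
  by_contra h
  have := (PySem.Chars.find_ne_neg_one_iff r NLs).mp h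
  exact hr (this.subset (by simp [NLs]))

theorem sp1_nl_split (u : List Char) : ∀ r : List Char, '\n' ∉ r → sp1 NLs (r ++ '\n' :: u) = [r, u] := by
  intro r
  induction r with
  | nil =>
    intro _
    rw [List.nil_append, sp1, if_pos (by simp [NLs])]
    simp [NLs]
  | cons c r' ih =>
    intro hr
    have hc : c ≠ '\n' := fun h => hr (by simp [h])
    rw [List.cons_append, sp1]
    rw [if_neg (by simp [NLs]; exact fun he => absurd he.symm hc)]
    rw [ih (fun h => hr (by simp [h]))]
    rfl

theorem extractChunk_of_clean (r h : List Char) (hr : '\n' ∉ r)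
    (hh : h = [] ∨ ∃ u, h = '\n' :: u) :
    extractChunk (r ++ h) =
      (if PySem.Chars.find r SBc = -1 then none
       else some (r.drop ((PySem.Chars.find r SBc).toNat + 3))) := by
  have hline : (sp1 NLs (r ++ h)).headD [] = r := by
    rcases hh with h0 | ⟨u, hu⟩
    · subst h0; rw [List.append_nil, sp1_nl_clean r hr]; rfl
    · subst hu; rw [sp1_nl_split u r hr]; rfl
  rw [extractChunk, hline]

-- main B lemma
theorem mainB (LS : List (List Char)) (hclean : ∀ l ∈ LS, '\n' ∉ l) :
    ((Cfun LS).drop 1).filterMap extractChunk = LS.filterMap extractLine2 := by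
  induction LS with
  | nil => rfl
  | cons l rest ih =>
    have hl : '\n' ∉ l := hclean l (by simp)
    have hrest : ∀ l' ∈ rest, '\n' ∉ l' := fun l' h => hclean l' (by simp [h])
    obtain ⟨h, t, hct, hh⟩ := Cfun_shape rest
    rw [Cfun, List.filterMap_cons]
    by_cases hp : Gc.isPrefixOf l
    · rw [if_pos hp, extractLine2, if_pos hp]
      rw [hct]
      simp only [chHead, List.drop_succ_cons, List.drop_zero, List.filterMap_cons]
      have hr : '\n' ∉ l.drop 10 := fun hm => hl (List.mem_of_mem_drop hm)
      rw [extractChunk_of_clean _ _ hr hh]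
      have ht' : t = (Cfun rest).drop 1 := by rw [hct]; rfl
      rw [ht']
      rw [ih hrest]
    · rw [if_neg hp, extractLine2, if_neg hp]
      rw [hct]
      simp only [chHead, List.drop_succ_cons, List.drop_zero]
      have ht' : t = (Cfun rest).drop 1 := by rw [hct]; rfl
      rw [ht', ih hrest]

-- find over the concrete "diff --git" prefix
theorem find_G_append (r : List Char) :
    PySem.Chars.find (Gc ++ r) SBc =
      if PySem.Chars.find r SBc = -1 then -1 else PySem.Chars.find r SBc + 10 := by
  have hshift := find_go_shift SBc (by simp [SBc]) r 10
  show PySem.Chars.find.go SBc (Gc ++ r) 0 = _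
  rw [show Gc ++ r = 'd'::'i'::'f'::'f'::' '::'-'::'-'::'g'::'i'::'t'::r by simp [Gc]]
  rw [PySem.Chars.find.go.eq_2, if_neg (by simp [SBc, List.isPrefixOf])]
  rw [PySem.Chars.find.go.eq_2, if_neg (by simp [SBc, List.isPrefixOf])]
  rw [PySem.Chars.find.go.eq_2, if_neg (by simp [SBc, List.isPrefixOf])]
  rw [PySem.Chars.find.go.eq_2, if_neg (by simp [SBc, List.isPrefixOf])]
  rw [PySem.Chars.find.go.eq_2, if_neg (by cases r <;> simp [SBc, List.isPrefixOf])]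
  rw [PySem.Chars.find.go.eq_2, if_neg (by simp [SBc, List.isPrefixOf])]
  rw [PySem.Chars.find.go.eq_2, if_neg (by simp [SBc, List.isPrefixOf])]
  rw [PySem.Chars.find.go.eq_2, if_neg (by simp [SBc, List.isPrefixOf])]
  rw [PySem.Chars.find.go.eq_2, if_neg (by simp [SBc, List.isPrefixOf])]
  rw [PySem.Chars.find.go.eq_2, if_neg (by simp [SBc, List.isPrefixOf])]
  norm_num at hshift ⊢
  rw [hshift]
  rfl

theorem extract_eq (l : List Char) : extractLine l = extractLine2 l := by
  rw [extractLine, extractLine2]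
  by_cases hp : Gc.isPrefixOf l
  · have hpl : Gc <+: l := List.isPrefixOf_iff_prefix.mp hp
    obtain ⟨r, rfl⟩ := hpl
    have hdrop : (Gc ++ r).drop 10 = r := by
      rw [show (10 : Nat) = Gc.length from rfl, List.drop_left]
    rw [if_pos hp, hdrop]
    by_cases hf : PySem.Chars.find r SBc = -1
    · rw [if_pos hf, if_neg]
      intro ⟨_, hne⟩
      exact hne (by rw [find_G_append, if_pos hf])
    · rw [if_neg hf]
      have hn : 0 ≤ PySem.Chars.find r SBc := find_nonneg_of_ne _ _ hf
      have hfl : PySem.Chars.find (Gc ++ r) SBc = PySem.Chars.find r SBc + 10 := by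
        rw [find_G_append, if_neg hf]
      rw [if_pos ⟨hp, by rw [hfl]; omega⟩]
      congr 1
      rw [hfl, show (PySem.Chars.find r SBc + 10).toNat = 10 + ((PySem.Chars.find r SBc).toNat + 3) - 3 by omega]
      rw [show 10 + ((PySem.Chars.find r SBc).toNat + 3) - 3 + 3 = 10 + ((PySem.Chars.find r SBc).toNat + 3) by omega]
      rw [← List.drop_drop, show (10 : Nat) = Gc.length from rfl, List.drop_left]
  · rw [if_neg hp, if_neg (by intro ⟨h1, _⟩; exact hp h1)]

-- ===== VERDICT (by name: the statement is the Claim_ definition above) =====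
theorem count_files_in_patch_spec : Claim_equal_count_files_in_patch := by
  intro patch _
  unfold Spec_count_files_in_patch count_files_in_patch count_files_in_patch_alt
  simp only [Gc_eq, SBc_eq, NLs_eq, SEPc_eq]
  rw [splitOn_eq_sp NLs (by simp [NLs]) patch.toList]
  rw [foldA]
  have hlines := lines_clean_flat patch.toList
  rw [show '\n' :: patch.toList = flatL (sp NLs patch.toList) from hlines.2.symm]
  rw [splitOn_eq_sp SEPc (by simp [SEPc]) _]
  rw [spf _ hlines.1]
  rw [foldB]
  rw [mainB _ hlines.1]
  simp only [List.nil_append]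
  congr 1
  exact List.filterMap_congr (fun l _ => extract_eq l)
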